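-- pv_equiv track=rewrite | github.com/pypi-data/pypi-mirror-225 | packages/CRISPR-HMM/CRISPR_HMM-1.0.0.tar.gz/CRISPR_HMM-1.0.0/crispr_hmm/util.py | get_all_alignment
-- ===== SOURCE A (Python) =====
-- def get_all_alignment(s,t):
--     """
--     Iteratively generate all alignment outcome between sequence s and t.
--
--     :param str s: The first sequence.
--
--     :param str t: The second sequence.
--
--     :return: A list of all alignment outcome.
--     :rtype: list[str]
--     """
--
--     aln_list = [("","")]
--     i = 0
--     while True:
--         tmp = []
--         counter = 0
--         for a in aln_list:
--             i, j = len(a[0]) - a[0].count("-"), len(a[1]) - a[1].count("-")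
--             if i == len(s) and j == len(t):
--                 tmp.append(a)
--                 counter += 1
--             else:
--                 if i < len(s):
--                     tmp.append((a[0]+s[i],a[1]+"-"))
--                 if j < len(t):
--                     tmp.append((a[0]+"-",a[1]+t[j]))
--                 if i < len(s) and j < len(t):
--                     tmp.append((a[0]+s[i],a[1]+t[j]))
--         if counter == len(aln_list):
--             break
--         else:
--             aln_list = tmp
--     return aln_list
-- ===== SOURCE B (Python) =====
-- def get_all_alignment(s, t):
--     """Depth-first enumeration threading explicit indices i, j instead of
--     re-deriving them from dash counts; emits leaves in the same pre-order."""
--     def go(a0, a1, i, j):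
--         if i == len(s) and j == len(t):
--             return [(a0, a1)]
--         res = []
--         if i < len(s):
--             res += go(a0 + s[i], a1 + "-", i + 1, j)
--         if j < len(t):
--             res += go(a0 + "-", a1 + t[j], i, j + 1)
--         if i < len(s) and j < len(t):
--             res += go(a0 + s[i], a1 + t[j], i + 1, j + 1)
--         return res
--     return go("", "", 0, 0)
-- ===== Notes on version B (the rewrite author's own statement) =====
-- stated objective: simpler
-- what changed: B replaces A's breadth-first loop that rebuilds the whole frontier each round and re-derives the positions i,j from dash counts by a single depth-first recursion that threads i,j as explicit integers, emitting the same leaves in the same pre-order; Pre_ excludes inputs whose sequences contain the gap symbol '-', on which A's dash-count bookkeeping never advances and the Python loops forever (A never returns there).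
import Mathlib
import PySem

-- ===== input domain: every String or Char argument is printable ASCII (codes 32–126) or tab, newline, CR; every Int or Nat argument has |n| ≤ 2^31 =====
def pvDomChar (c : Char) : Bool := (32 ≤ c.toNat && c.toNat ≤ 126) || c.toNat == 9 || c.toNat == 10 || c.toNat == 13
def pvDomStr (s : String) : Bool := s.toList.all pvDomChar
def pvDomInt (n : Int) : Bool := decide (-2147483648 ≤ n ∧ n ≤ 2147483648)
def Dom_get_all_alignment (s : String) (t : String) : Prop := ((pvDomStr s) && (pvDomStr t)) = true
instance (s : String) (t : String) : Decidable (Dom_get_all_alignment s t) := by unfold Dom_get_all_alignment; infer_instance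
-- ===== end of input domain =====

-- B replaces A's breadth-first rebuild-the-whole-frontier loop (indices re-derived from dash
-- counts each round) by a one-pass depth-first recursion threading explicit indices (simpler).


-- ===== PORT A =====
-- i = len(a0) - a0.count("-")  (and likewise j), exactly as in the Python.
def pvIdx (a : List Char) : Nat := a.length - PySem.Chars.count a ['-']

-- the body of A's 'for a in aln_list' loop: state = (tmp, counter)
def pvStepA (s t : List Char) (acc : List (List Char × List Char) × Nat)
    (a : List Char × List Char) : List (List Char × List Char) × Nat :=
  let i := pvIdx a.1
  let j := pvIdx a.2
  if i = s.length ∧ j = t.length then (acc.1 ++ [a], acc.2 + 1)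
  else
    -- s[i] / t[j] ported as getD: the guarding branch guarantees the index is in range,
    -- exactly where Python's s[i] succeeds
    let t1 := if i < s.length then acc.1 ++ [(a.1 ++ [s.getD i ' '], a.2 ++ ['-'])] else acc.1
    let t2 := if j < t.length then t1 ++ [(a.1 ++ ['-'], a.2 ++ [t.getD j ' '])] else t1
    let t3 := if i < s.length ∧ j < t.length then
                t2 ++ [(a.1 ++ [s.getD i ' '], a.2 ++ [t.getD j ' '])] else t2
    (t3, acc.2)

-- A's 'while True': ported with fuel |s|+|t|+1; under Pre_ the loop provably breaks first
-- (without Pre_ — a dash inside s or t — the Python never returns at all).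
def pvLoopA (s t : List Char) : Nat → List (List Char × List Char) → List (List Char × List Char)
  | 0, aln => aln
  | fuel+1, aln =>
    let r := aln.foldl (pvStepA s t) ([], 0)
    if r.2 = aln.length then aln else pvLoopA s t fuel r.1

def get_all_alignment (s : String) (t : String) : List (String × String) :=
  (pvLoopA s.toList t.toList (s.toList.length + t.toList.length + 1) [([], [])]).map
    (fun a => (String.ofList a.1, String.ofList a.2))

-- ===== PORT B =====
-- Source B's recursive go(a0, a1, i, j); res += … in branch order s, t, both
def pvGoB (s t : List Char) (a0 a1 : List Char) (i j : Nat) : List (List Char × List Char) :=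
  if i = s.length ∧ j = t.length then [(a0, a1)]
  else
    (if h : i < s.length then pvGoB s t (a0 ++ [s.getD i ' ']) (a1 ++ ['-']) (i+1) j else []) ++
    (if h : j < t.length then pvGoB s t (a0 ++ ['-']) (a1 ++ [t.getD j ' ']) i (j+1) else []) ++
    (if h : i < s.length ∧ j < t.length then
       pvGoB s t (a0 ++ [s.getD i ' ']) (a1 ++ [t.getD j ' ']) (i+1) (j+1) else [])
termination_by (s.length - i) + (t.length - j)
decreasing_by all_goals omega

def get_all_alignment_alt (s : String) (t : String) : List (String × String) :=
  (pvGoB s.toList t.toList [] [] 0 0).map (fun a => (String.ofList a.1, String.ofList a.2))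

-- ===== PRECONDITION & SPEC =====
-- Pre_ excludes inputs in which s or t contains the gap symbol '-': there A's dash-count
-- bookkeeping never advances past it and the Python loops forever (A never returns).
def Pre_get_all_alignment (s : String) (t : String) : Prop :=
  '-' ∉ s.toList ∧ '-' ∉ t.toList
instance (s : String) (t : String) : Decidable (Pre_get_all_alignment s t) := by
  unfold Pre_get_all_alignment; infer_instance

def pvWitness_get_all_alignment : String × String := ("ab", "c")

def Spec_get_all_alignment (s : String) (t : String) (out : List (String × String)) : Prop := out = get_all_alignment_alt s t
instance (s : String) (t : String) (out : List (String × String)) : Decidable (Spec_get_all_alignment s t out) := by unfold Spec_get_all_alignment; infer_instance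

-- ===== CLAIM (what is proved, stated in full; the proofs are below) =====
def Claim_equal_get_all_alignment : Prop := ∀ (s : String) (t : String), Dom_get_all_alignment s t → Pre_get_all_alignment s t → Spec_get_all_alignment s t (get_all_alignment s t)

-- ===== LEMMAS AND PROOFS =====

-- PySem.Chars.count on a single-character needle is List.count
lemma pvCount_go_singleton (c : Char) : ∀ (l : List Char) (fuel acc : Nat),
    l.length ≤ fuel → PySem.Chars.count.go [c] fuel l acc = acc + l.count c := by
  intro l
  induction l with
  | nil => intro fuel acc _; cases fuel <;> simp [PySem.Chars.count.go]
  | cons x xs ih =>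
    intro fuel acc h
    have hx : xs.length ≤ Nat.pred fuel := by simp at h ⊢; omega
    cases fuel with
    | zero => simp at h
    | succ n =>
      rw [PySem.Chars.count.go]
      by_cases hc : x = c
      · have hp : ([c].isPrefixOf (x :: xs)) = true := by simp [List.isPrefixOf, hc]
        rw [hp]
        simp only [if_true, List.length_singleton, List.drop_one, List.tail_cons]
        rw [ih n (acc + 1) hx]
        simp [hc]; omega
      · have hp : ([c].isPrefixOf (x :: xs)) = false := by
          simp [List.isPrefixOf]
          intro h'; exact absurd h'.symm hc
        rw [hp]
        simp only [Bool.false_eq_true, if_false]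
        rw [ih n acc hx]
        simp [hc]

lemma pvCount_singleton (cs : List Char) (c : Char) :
    PySem.Chars.count cs [c] = cs.count c := by
  simpa using pvCount_go_singleton c cs cs.length 0 le_rfl

lemma pvIdx_nil : pvIdx [] = 0 := by simp [pvIdx, pvCount_singleton]

lemma pvIdx_append_dash (a : List Char) : pvIdx (a ++ ['-']) = pvIdx a := by
  have hle := List.count_le_length (l := a) (a := '-')
  simp only [pvIdx, pvCount_singleton, List.count_append, List.length_append,
    List.count_singleton, List.length_singleton]
  simp only [beq_self_eq_true, if_true]
  omega

lemma pvIdx_append_ne (a : List Char) (c : Char) (hc : c ≠ '-') :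
    pvIdx (a ++ [c]) = pvIdx a + 1 := by
  have hle := List.count_le_length (l := a) (a := '-')
  simp only [pvIdx, pvCount_singleton, List.count_append, List.length_append,
    List.count_singleton, List.length_singleton]
  rw [show (c == '-') = false from beq_eq_false_iff_ne.mpr hc]
  simp only [Bool.false_eq_true, if_false]
  omega

-- invariant carried by every partial alignment in A's frontier
def pvGood (s t : List Char) (a : List Char × List Char) : Prop :=
  pvIdx a.1 ≤ s.length ∧ pvIdx a.2 ≤ t.length

def pvRem (s t : List Char) (a : List Char × List Char) : Nat :=
  (s.length - pvIdx a.1) + (t.length - pvIdx a.2)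

-- the complete alignments a partial alignment expands to, in B's order
def pvLeaves (s t : List Char) (a : List Char × List Char) : List (List Char × List Char) :=
  pvGoB s t a.1 a.2 (pvIdx a.1) (pvIdx a.2)

def pvComplete (s t : List Char) (a : List Char × List Char) : Prop :=
  pvIdx a.1 = s.length ∧ pvIdx a.2 = t.length

-- A's children of one frontier element, in A's append order
def pvChildren (s t : List Char) (a : List Char × List Char) : List (List Char × List Char) :=
  (if pvIdx a.1 < s.length then [(a.1 ++ [s.getD (pvIdx a.1) ' '], a.2 ++ ['-'])] else []) ++
  (if pvIdx a.2 < t.length then [(a.1 ++ ['-'], a.2 ++ [t.getD (pvIdx a.2) ' '])] else []) ++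
  (if pvIdx a.1 < s.length ∧ pvIdx a.2 < t.length then
     [(a.1 ++ [s.getD (pvIdx a.1) ' '], a.2 ++ [t.getD (pvIdx a.2) ' '])] else [])

def pvStep1 (s t : List Char) (a : List Char × List Char) : List (List Char × List Char) :=
  if pvIdx a.1 = s.length ∧ pvIdx a.2 = t.length then [a] else pvChildren s t a

lemma pvLeaves_complete (s t : List Char) (a : List Char × List Char)
    (h : pvComplete s t a) : pvLeaves s t a = [a] := by
  obtain ⟨h1, h2⟩ := h
  rw [pvLeaves, pvGoB]
  simp [h1, h2]

lemma pvGetD_ne_dash (s : List Char) (hs : '-' ∉ s) (i : Nat) (hi : i < s.length) :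
    s.getD i ' ' ≠ '-' := by
  intro h
  exact hs (h ▸ (List.getD_eq_getElem s ' ' hi ▸ List.getElem_mem hi))

lemma pvChildren_good_rem (s t : List Char) (hs : '-' ∉ s) (ht : '-' ∉ t)
    (a : List Char × List Char) (hG : pvGood s t a) :
    ∀ b ∈ pvChildren s t a, pvGood s t b ∧ pvRem s t b < pvRem s t a := by
  obtain ⟨hGs, hGt⟩ := hG
  intro b hb
  simp only [pvChildren, List.mem_append] at hb
  rcases hb with (hb | hb) | hb
  · split at hb
    · next hi =>
      rw [List.mem_singleton] at hb; subst hb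
      have h1 := pvIdx_append_ne a.1 _ (pvGetD_ne_dash s hs _ hi)
      have h2 := pvIdx_append_dash a.2
      refine ⟨⟨?_, ?_⟩, ?_⟩ <;> simp only [pvRem] <;> omega
    · exact absurd hb (List.not_mem_nil)
  · split at hb
    · next hj =>
      rw [List.mem_singleton] at hb; subst hb
      have h1 := pvIdx_append_dash a.1
      have h2 := pvIdx_append_ne a.2 _ (pvGetD_ne_dash t ht _ hj)
      refine ⟨⟨?_, ?_⟩, ?_⟩ <;> simp only [pvRem] <;> omega
    · exact absurd hb (List.not_mem_nil)
  · split at hb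
    · next hij =>
      obtain ⟨hi, hj⟩ := hij
      rw [List.mem_singleton] at hb; subst hb
      have h1 := pvIdx_append_ne a.1 _ (pvGetD_ne_dash s hs _ hi)
      have h2 := pvIdx_append_ne a.2 _ (pvGetD_ne_dash t ht _ hj)
      refine ⟨⟨?_, ?_⟩, ?_⟩ <;> simp only [pvRem] <;> omega
    · exact absurd hb (List.not_mem_nil)

lemma pvLeaves_expand (s t : List Char) (hs : '-' ∉ s) (ht : '-' ∉ t)
    (a : List Char × List Char) (hnc : ¬ pvComplete s t a) :
    pvLeaves s t a = (pvChildren s t a).flatMap (pvLeaves s t) := by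
  rw [pvLeaves, pvGoB, if_neg (show ¬ (pvIdx a.1 = s.length ∧ pvIdx a.2 = t.length) from hnc)]
  rw [pvChildren, List.flatMap_append, List.flatMap_append]
  congr 1
  · congr 1
    · by_cases hi : pvIdx a.1 < s.length
      · rw [dif_pos hi, if_pos hi, List.flatMap_cons, List.flatMap_nil, List.append_nil]
        simp only [pvLeaves]
        rw [pvIdx_append_ne a.1 _ (pvGetD_ne_dash s hs _ hi), pvIdx_append_dash]
      · rw [dif_neg hi, if_neg hi, List.flatMap_nil]
    · by_cases hj : pvIdx a.2 < t.length
      · rw [dif_pos hj, if_pos hj, List.flatMap_cons, List.flatMap_nil, List.append_nil]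
        simp only [pvLeaves]
        rw [pvIdx_append_dash, pvIdx_append_ne a.2 _ (pvGetD_ne_dash t ht _ hj)]
      · rw [dif_neg hj, if_neg hj, List.flatMap_nil]
  · by_cases hij : pvIdx a.1 < s.length ∧ pvIdx a.2 < t.length
    · obtain ⟨hi, hj⟩ := hij
      rw [dif_pos ⟨hi, hj⟩, if_pos ⟨hi, hj⟩, List.flatMap_cons, List.flatMap_nil,
        List.append_nil]
      simp only [pvLeaves]
      rw [pvIdx_append_ne a.1 _ (pvGetD_ne_dash s hs _ hi),
        pvIdx_append_ne a.2 _ (pvGetD_ne_dash t ht _ hj)]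
    · rw [dif_neg hij, if_neg hij, List.flatMap_nil]

-- A's inner for-loop computes (tmp, counter) = (flatMap pvStep1, number of complete elements)
lemma pvFoldA (s t : List Char) : ∀ (aln : List (List Char × List Char))
    (acc : List (List Char × List Char) × Nat),
    aln.foldl (pvStepA s t) acc =
      (acc.1 ++ aln.flatMap (pvStep1 s t),
       acc.2 + aln.countP (fun a => decide (pvIdx a.1 = s.length ∧ pvIdx a.2 = t.length))) := by
  intro aln
  induction aln with
  | nil => intro acc; simp
  | cons a aln ih =>
    intro acc
    rw [List.foldl_cons, ih]
    by_cases hc : pvComplete s t a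
    · obtain ⟨h1, h2⟩ := hc
      simp [pvStepA, pvStep1, h1, h2]
      omega
    · have hc' : ¬ (pvIdx a.1 = s.length ∧ pvIdx a.2 = t.length) := hc
      simp only [pvStepA, if_neg hc']
      rw [List.flatMap_cons]
      simp only [pvStep1, if_neg hc', pvChildren, Prod.mk.injEq]
      constructor
      · split_ifs <;> simp [List.append_assoc]
      · rw [List.countP_cons]
        simp [hc']

lemma pvLoopA_eq (s t : List Char) (hs : '-' ∉ s) (ht : '-' ∉ t) :
    ∀ (fuel : Nat) (aln : List (List Char × List Char)),
      (∀ a ∈ aln, pvGood s t a ∧ pvRem s t a < fuel) →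
      pvLoopA s t fuel aln = aln.flatMap (pvLeaves s t) := by
  intro fuel
  induction fuel with
  | zero =>
    intro aln h
    cases aln with
    | nil => simp [pvLoopA]
    | cons a aln => exact absurd (h a (by simp)).2 (by omega)
  | succ n ih =>
    intro aln h
    rw [pvLoopA]
    rw [pvFoldA s t aln ([], 0)]
    simp only [List.nil_append, Nat.zero_add]
    by_cases hcnt : aln.countP (fun a => decide (pvIdx a.1 = s.length ∧ pvIdx a.2 = t.length)) = aln.length
    · rw [if_pos hcnt]
      have hall := List.countP_eq_length.mp hcnt
      symm
      have : aln.flatMap (pvLeaves s t) = aln.flatMap (fun a => [a]) :=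
        List.flatMap_congr (fun a ha => pvLeaves_complete s t a (by simpa using hall a ha))
      rw [this, List.flatMap_singleton']
    · rw [if_neg hcnt]
      -- some element is incomplete, hence has positive remaining work, hence n ≥ 1
      have hex : ∃ a ∈ aln, ¬ pvComplete s t a := by
        by_contra hno
        push Not at hno
        exact hcnt (List.countP_eq_length.mpr (fun a ha => decide_eq_true (hno a ha)))
      obtain ⟨a₀, ha₀, hnc₀⟩ := hex
      have hG₀ := (h a₀ ha₀).1
      have hrem₀ : 1 ≤ pvRem s t a₀ := by
        by_contra hr
        push Not at hr
        exact hnc₀ ⟨by have := hG₀.1; simp only [pvRem] at hr; omega,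
                    by have := hG₀.2; simp only [pvRem] at hr; omega⟩
      have hn1 : 1 ≤ n := by have := (h a₀ ha₀).2; omega
      rw [ih]
      · -- leaves are preserved by one expansion round
        rw [List.flatMap_assoc]
        apply List.flatMap_congr
        intro a ha
        by_cases hc : pvComplete s t a
        · obtain ⟨h1, h2⟩ := hc
          simp [pvStep1, h1, h2, pvLeaves_complete s t a ⟨h1, h2⟩]
        · rw [pvStep1,
            if_neg (show ¬ (pvIdx a.1 = s.length ∧ pvIdx a.2 = t.length) from hc),
            ← pvLeaves_expand s t hs ht a hc]
      · intro b hb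
        rw [List.mem_flatMap] at hb
        obtain ⟨a, ha, hba⟩ := hb
        obtain ⟨hGa, hra⟩ := h a ha
        by_cases hc : pvComplete s t a
        · obtain ⟨h1, h2⟩ := hc
          rw [pvStep1, if_pos ⟨h1, h2⟩] at hba
          rw [List.mem_singleton] at hba; subst hba
          refine ⟨hGa, ?_⟩
          simp only [pvRem, h1, h2]; omega
        · rw [pvStep1,
            if_neg (show ¬ (pvIdx a.1 = s.length ∧ pvIdx a.2 = t.length) from hc)] at hba
          obtain ⟨hGb, hrb⟩ := pvChildren_good_rem s t hs ht a hGa b hba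
          exact ⟨hGb, by omega⟩

-- ===== VERDICT (by name: the statement is the Claim_ definition above) =====
theorem get_all_alignment_spec : Claim_equal_get_all_alignment := by
  intro s t _ hPre
  obtain ⟨hs, ht⟩ := hPre
  show get_all_alignment s t = get_all_alignment_alt s t
  rw [get_all_alignment, get_all_alignment_alt]
  congr 1
  rw [pvLoopA_eq s.toList t.toList hs ht _ [([], [])]
      (by intro a ha; simp at ha; subst ha
          refine ⟨⟨by simp [pvIdx_nil], by simp [pvIdx_nil]⟩, ?_⟩
          simp [pvRem, pvIdx_nil])]
  simp [pvLeaves, pvIdx_nil]
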